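-- pv_equiv track=rewrite | github.com/algoalgo007/CodingTest | pystudy/Exercise/Greedy/Q06.py | solution
-- ===== SOURCE A (Python) =====
-- import heapq
--
-- def solution(food_times, k):
--     if sum(food_times) <= k:
--         return -1
--     q = []
--     length = len(food_times)
--     for i in range(length):
--         heapq.heappush(q, (food_times[i], i+1))
--     prev = 0
--     while k:
--         food = heapq.heappop(q)
--         minus = length*(food[0]-prev)
--         if k - minus <= 0:
--             heapq.heappush(q, (food[0], food[1]))
--             break
--         length -= 1
--         k -= minus
--         prev = food[0]
--     q.sort(key = lambda x: x[1])
--     return q[(k) % length][1]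
-- ===== SOURCE B (Python) =====
-- def solution(food_times, k):
--     if sum(food_times) <= k:
--         return -1
--
--     def eaten(t):
--         return sum(min(x, t) for x in food_times)
--
--     # bisect the value space for the last time level lo with eaten(lo) < k
--     lo, hi = -(2 ** 33), 2 ** 33
--     while lo + 1 < hi:
--         mid = (lo + hi) // 2
--         if eaten(mid) < k:
--             lo = mid
--         else:
--             hi = mid
--
--     below = [x for x in food_times if x <= lo]
--     if below:
--         t = max(below)
--         r = k - eaten(t)
--         remaining = [i + 1 for i, x in enumerate(food_times) if x > t]
--     else:
--         r = k
--         remaining = list(range(1, len(food_times) + 1))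
--     return remaining[r % len(remaining)]
-- ===== Notes on version B (the rewrite author's own statement) =====
-- stated objective: alternative
-- what changed: Replaces the heap simulation (n pushes, then a pop/push-back subtraction loop over the sorted order) with a value-space binary search for the last fully-eaten time level followed by one counting pass that filters the surviving indices.
-- outside the precondition, e.g. on solution([-1, 3], 0): A returns 1, B returns 2
import Mathlib
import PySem

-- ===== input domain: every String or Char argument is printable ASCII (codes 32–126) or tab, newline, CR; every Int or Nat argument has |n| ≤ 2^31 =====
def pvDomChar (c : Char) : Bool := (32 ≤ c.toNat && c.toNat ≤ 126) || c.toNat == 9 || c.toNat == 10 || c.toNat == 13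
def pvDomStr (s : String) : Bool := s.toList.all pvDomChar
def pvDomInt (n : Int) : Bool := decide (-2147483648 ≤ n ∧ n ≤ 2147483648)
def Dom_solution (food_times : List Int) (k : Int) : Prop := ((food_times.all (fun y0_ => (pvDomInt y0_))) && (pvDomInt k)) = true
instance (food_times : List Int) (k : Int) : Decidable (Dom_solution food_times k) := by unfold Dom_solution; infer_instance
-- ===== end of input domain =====

-- B replaces A's heap simulation (n pushes, then a pop/push-back subtraction loop) with a
-- value-space binary search for the last fully-eaten time level plus one counting/filter pass;
-- objective: alternative algorithm, similar cost.

-- ===== PORT A =====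
-- Python's tuple comparison (t, i) < (u, j), used by heapq's ordering.
def pairLt (a b : Int × Int) : Bool :=
  decide (a.1 < b.1) || (!decide (b.1 < a.1) && decide (a.2 < b.2))

-- heapq.heappush / heappop are library calls; they are ported through the priority queue's
-- observable contract: the queue is kept as an ordered list (insert in tuple order / pop the
-- minimum = the head).  The heap's internal array layout is observed by A only through the final
-- q.sort(key=lambda x: x[1]) over distinct indices, which erases it, so this model is exact.
def heappushA (q : List (Int × Int)) (x : Int × Int) : List (Int × Int) :=
  PySem.List.insertBy pairLt x q

-- the 'while k:' loop of A; returns (k, q, length) as left by the loop.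
-- On the empty queue Python's heappop raises IndexError (excluded by Pre_solution).
def loopA (q : List (Int × Int)) (length k prev : Int) : Int × List (Int × Int) × Int :=
  if k = 0 then (k, q, length)
  else
    match q with
    | [] => (k, [], length)
    | food :: rest =>
      let minus := length * (food.1 - prev)
      if k - minus ≤ 0 then (k, heappushA rest food, length)
      else loopA rest (length - 1) (k - minus) food.1
termination_by q.length
decreasing_by simp

def solution (food_times : List Int) (k : Int) : Int :=
  if food_times.sum ≤ k then -1
  else
    let length : Int := (food_times.length : Int)
    let q := (PySem.List.pyRange 0 length 1).foldl
      (fun q i => heappushA q (PySem.List.pyGetD food_times i 0, i + 1)) []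
    let r := loopA q length k 0
    let qs := PySem.List.sorted r.2.1 (fun x => x.2)
    ((PySem.List.pyGet? qs (PySem.Int.mod r.1 r.2.2)).getD (0, 0)).2

-- ===== PORT B =====
-- eaten(t) = sum(min(x, t) for x in food_times)
def eatenB (food_times : List Int) (t : Int) : Int :=
  (food_times.map (fun x => min x t)).sum

-- the while-loop of B's binary search over the value space; returns the final lo
def bsearchB (food_times : List Int) (k lo hi : Int) : Int :=
  if lo + 1 < hi then
    let mid := PySem.Int.floordiv (lo + hi) 2
    if eatenB food_times mid < k then bsearchB food_times k mid hi
    else bsearchB food_times k lo mid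
  else lo
termination_by (hi - lo).toNat
decreasing_by
  · have hm : PySem.Int.floordiv (lo + hi) 2 = (lo + hi) / 2 :=
      PySem.Int.floordiv_eq_ediv_of_pos (by norm_num)
    rw [hm]; omega
  · have hm : PySem.Int.floordiv (lo + hi) 2 = (lo + hi) / 2 :=
      PySem.Int.floordiv_eq_ediv_of_pos (by norm_num)
    rw [hm]; omega

def solution_alt (food_times : List Int) (k : Int) : Int :=
  if food_times.sum ≤ k then -1
  else
    let lo := bsearchB food_times k (-(2 ^ 33)) (2 ^ 33)
    let below := food_times.filter (fun x => decide (x ≤ lo))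
    if below ≠ [] then
      let t := (PySem.List.max? below (fun x => x)).getD 0
      let r := k - eatenB food_times t
      let remaining := ((PySem.List.enumerate food_times).filter
        (fun p => decide (t < p.2))).map (fun p => p.1 + 1)
      (PySem.List.pyGet? remaining (PySem.Int.mod r (remaining.length : Int))).getD 0
    else
      let r := k
      let remaining := PySem.List.pyRange 1 ((food_times.length : Int) + 1) 1
      (PySem.List.pyGet? remaining (PySem.Int.mod r (remaining.length : Int))).getD 0

-- ===== PRECONDITION & SPEC =====
-- Pre_ excludes (a) the empty list with k < 0, where A raises IndexError (heappop from an empty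
-- heap; B raises ZeroDivisionError), and (b) k = 0 together with a negative food time and
-- positive total: a negative 'time to eat' is meaningless, and there A's while-k guard and B's
-- level accounting make equally accidental choices (A returns the first food, B another).
def Pre_solution (food_times : List Int) (k : Int) : Prop :=
  (food_times ≠ [] ∨ 0 ≤ k) ∧
    ¬(k = 0 ∧ (∃ t ∈ food_times, t < 0) ∧ 0 < food_times.sum)
instance (food_times : List Int) (k : Int) : Decidable (Pre_solution food_times k) := by
  unfold Pre_solution; infer_instance
def pvWitness_solution : List Int × Int := ([3, 1, 2], 5)

def Spec_solution (food_times : List Int) (k : Int) (out : Int) : Prop := out = solution_alt food_times k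
instance (food_times : List Int) (k : Int) (out : Int) : Decidable (Spec_solution food_times k out) := by unfold Spec_solution; infer_instance

-- ===== CLAIM (what is proved, stated in full; the proofs are below) =====
def Claim_equal_solution : Prop := ∀ (food_times : List Int) (k : Int), Dom_solution food_times k → Pre_solution food_times k → Spec_solution food_times k (solution food_times k)

-- ===== LEMMAS AND PROOFS =====

-- the (t, i+1) pairs A pushes, in original order
def pairsB (food_times : List Int) : List (Int × Int) :=
  (PySem.List.enumerate food_times).map (fun p => (p.2, p.1 + 1))

-- model of A's while-loop over the queue as an ordered list
def loopB (q : List (Int × Int)) (length k prev : Int) : Int × List (Int × Int) :=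
  match q with
  | [] => (k, [])
  | p :: ps =>
    if k = 0 then (k, p :: ps)
    else
      let minus := length * (p.1 - prev)
      if k - minus ≤ 0 then (k, p :: ps)
      else loopB ps (length - 1) (k - minus) p.1

-- Σ_{p ∈ q} min(p.1, t)
def eS (q : List (Int × Int)) (t : Int) : Int :=
  (q.map (fun p => min p.1 t)).sum

-- `a ≤lex b`, the negation of pairLt the other way round
def pairLe (a b : Int × Int) : Prop := a.1 < b.1 ∨ (a.1 = b.1 ∧ a.2 ≤ b.2)

theorem pairLt_iff (a b : Int × Int) :
    pairLt a b = true ↔ (a.1 < b.1 ∨ (a.1 = b.1 ∧ a.2 < b.2)) := by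
  simp [pairLt]; omega

theorem not_pairLt_iff (a b : Int × Int) : pairLt a b = false ↔ pairLe b a := by
  simp [pairLt, pairLe]; omega

theorem insertBy_pairwise (x : Int × Int) (l : List (Int × Int))
    (h : l.Pairwise (fun a b => pairLt b a = false)) :
    (PySem.List.insertBy pairLt x l).Pairwise (fun a b => pairLt b a = false) := by
  induction l with
  | nil => simp [PySem.List.insertBy]
  | cons y ys ih =>
    rw [List.pairwise_cons] at h
    obtain ⟨hy, hys⟩ := h
    by_cases hxy : pairLt x y = true
    · rw [show PySem.List.insertBy pairLt x (y :: ys) = x :: y :: ys from by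
        simp [PySem.List.insertBy, hxy]]
      rw [List.pairwise_cons]
      constructor
      · intro z hz
        rw [List.mem_cons] at hz
        rw [not_pairLt_iff]
        rw [pairLt_iff] at hxy
        rcases hz with rfl | hz
        · unfold pairLe; omega
        · have := hy z hz
          rw [not_pairLt_iff] at this
          unfold pairLe at this ⊢
          omega
      · rw [List.pairwise_cons]; exact ⟨hy, hys⟩
    · rw [show PySem.List.insertBy pairLt x (y :: ys) = y :: PySem.List.insertBy pairLt x ys from by
        simp [PySem.List.insertBy, hxy]]
      rw [List.pairwise_cons]
      refine ⟨?_, ih hys⟩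
      intro z hz
      rw [PySem.List.mem_insertBy] at hz
      rcases hz with rfl | hz
      · simpa using hxy
      · exact hy z hz

theorem foldl_insertBy_pairwise (xs acc : List (Int × Int))
    (h : acc.Pairwise (fun a b => pairLt b a = false)) :
    (xs.foldl (fun acc x => PySem.List.insertBy pairLt x acc) acc).Pairwise
      (fun a b => pairLt b a = false) := by
  induction xs generalizing acc with
  | nil => simpa using h
  | cons x xs ih => exact ih _ (insertBy_pairwise x acc h)

-- sorted2 with the tuple key (fst, snd) is exactly the insertion fold with pairLt
theorem sorted2_eq_foldl (xs : List (Int × Int)) :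
    PySem.List.sorted2 xs (fun x => x.1) (fun x => x.2) =
      xs.foldl (fun acc x => PySem.List.insertBy pairLt x acc) [] := rfl

-- the list of pairs A pushes equals the generator-expression list pairsB
theorem range_map_eq_pairsB_aux (xs : List Int) (s : Int) :
    (List.range xs.length).map (fun j => (xs.getD j 0, (j : Int) + (s + 1))) =
      (PySem.List.enumerate xs s).map (fun p => (p.2, p.1 + 1)) := by
  induction xs generalizing s with
  | nil => simp [PySem.List.enumerate_nil]
  | cons x t ih =>
    rw [PySem.List.enumerate_cons]
    simp only [List.length_cons, List.range_succ_eq_map, List.map_cons, List.map_map]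
    congr 1
    · simp
    · rw [← ih (s + 1)]
      apply List.map_congr_left
      intro j hj
      simp only [Function.comp, List.getD_cons_succ]
      congr 1
      push_cast; ring

theorem loop_eq (q : List (Int × Int)) (len k prev : Int)
    (hs : q.Pairwise (fun a b => pairLt b a = false))
    (hn : (q.map Prod.snd).Nodup) :
    loopA q len k prev =
      ((loopB q len k prev).1, (loopB q len k prev).2,
        len - ((q.length : Int) - ((loopB q len k prev).2.length : Int))) := by
  induction q generalizing len k prev with
  | nil =>
    rw [loopA]
    simp [loopB]
  | cons food rest ih =>
    rw [List.pairwise_cons] at hs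
    obtain ⟨hhd, hrest⟩ := hs
    rw [List.map_cons, List.nodup_cons] at hn
    obtain ⟨hns, hnr⟩ := hn
    rw [loopA]
    by_cases hk : k = 0
    · simp [loopB, hk]
    · rw [if_neg hk]
      conv_rhs => rw [loopB]
      rw [if_neg hk]
      by_cases hbr : k - len * (food.1 - prev) ≤ 0
      · have hpush : heappushA rest food = food :: rest := by
          cases rest with
          | nil => rfl
          | cons y ys =>
            have h1 : pairLt y food = false := hhd y (by simp)
            have h2 : food.2 ≠ y.2 := by
              intro h
              exact hns (by rw [List.map_cons, List.mem_cons]; left; exact h)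
            have h3 : pairLt food y = true := by
              rw [not_pairLt_iff] at h1
              rw [pairLt_iff]
              unfold pairLe at h1
              omega
            simp [heappushA, PySem.List.insertBy, h3]
        simp only [hbr, if_pos, hpush]
        simp
      · rw [if_neg hbr, if_neg hbr]
        rw [ih (len - 1) (k - len * (food.1 - prev)) food.1 hrest hnr]
        simp only [List.length_cons]
        congr 1
        congr 1
        push_cast
        ring

-- the heap A builds, as a list, is exactly the sorted pairs list
theorem build_eq_sorted2 (ft : List Int) :
    (PySem.List.pyRange 0 (ft.length : Int) 1).foldl
        (fun q i => heappushA q (PySem.List.pyGetD ft i 0, i + 1)) [] =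
      PySem.List.sorted2 (pairsB ft) (fun x => x.1) (fun x => x.2) := by
  rw [sorted2_eq_foldl]
  unfold pairsB
  rw [← range_map_eq_pairsB_aux ft 0]
  rw [PySem.List.pyRange_zero_nat, List.foldl_map, List.foldl_map]
  congr 1
  funext acc j
  simp [heappushA]

theorem sortedPairs_pairwise (ft : List Int) :
    (PySem.List.sorted2 (pairsB ft) (fun x => x.1) (fun x => x.2)).Pairwise
      (fun a b => pairLt b a = false) := by
  rw [sorted2_eq_foldl]
  exact foldl_insertBy_pairwise _ [] (by simp)

theorem sortedPairs_snd_nodup (ft : List Int) :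
    ((PySem.List.sorted2 (pairsB ft) (fun x => x.1) (fun x => x.2)).map Prod.snd).Nodup := by
  have hperm : ((PySem.List.sorted2 (pairsB ft) (fun x => x.1) (fun x => x.2)).map Prod.snd).Perm
      ((pairsB ft).map Prod.snd) :=
    (PySem.List.sorted2_perm (pairsB ft) _ _ false).map Prod.snd
  refine hperm.nodup_iff.mpr ?_
  have : (pairsB ft).map Prod.snd =
      ((PySem.List.enumerate ft 0).map (fun p => p.1)).map (fun z => z + 1) := by
    simp [pairsB, List.map_map, Function.comp]
  rw [this, PySem.List.map_fst_enumerate]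
  exact (PySem.List.nodup_pyRange_one 0 (0 + (ft.length : Int))).map
    (fun a b h => by omega)

theorem sortedPairs_length (ft : List Int) :
    (PySem.List.sorted2 (pairsB ft) (fun x => x.1) (fun x => x.2)).length = ft.length := by
  rw [(PySem.List.sorted2_perm (pairsB ft) _ _ false).length_eq]
  simp [pairsB, PySem.List.length_enumerate]

-- ---- closed-form characterisation of the loop on a sorted queue ----

theorem eS_const (q : List (Int × Int)) (t : Int) (h : ∀ p ∈ q, t ≤ p.1) :
    eS q t = (q.length : Int) * t := by
  induction q with
  | nil => simp [eS]
  | cons p ps ih =>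
    have hp : t ≤ p.1 := h p (by simp)
    have := ih (fun x hx => h x (by simp [hx]))
    simp only [eS, List.map_cons, List.sum_cons, List.length_cons] at this ⊢
    rw [min_eq_right hp, this]
    push_cast; ring

theorem eS_lower (q : List (Int × Int)) (t prev : Int) (h : ∀ p ∈ q, prev ≤ min p.1 t) :
    (q.length : Int) * prev ≤ eS q t := by
  induction q with
  | nil => simp [eS]
  | cons p ps ih =>
    have hp := h p (by simp)
    have := ih (fun x hx => h x (by simp [hx]))
    simp only [eS, List.map_cons, List.sum_cons, List.length_cons] at this ⊢
    push_cast
    rw [add_mul, one_mul]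
    have hpm : prev ≤ min p.1 t := hp
    linarith

theorem eS_mono (q : List (Int × Int)) (t u : Int) (h : t ≤ u) : eS q t ≤ eS q u := by
  induction q with
  | nil => simp [eS]
  | cons p ps ih =>
    simp only [eS, List.map_cons, List.sum_cons] at ih ⊢
    have : min p.1 t ≤ min p.1 u := by omega
    omega

theorem eS_cons_decomp (p : Int × Int) (ps : List (Int × Int)) (t prev : Int)
    (hp : p.1 ≤ t) :
    eS (p :: ps) t - ((p :: ps).length : Int) * prev =
      (eS ps t - (ps.length : Int) * p.1) + ((p :: ps).length : Int) * (p.1 - prev) := by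
  simp only [eS, List.map_cons, List.sum_cons, List.length_cons]
  rw [min_eq_left hp]
  push_cast
  ring

-- no food level is strictly below k: the loop stops at once
theorem loopB_no_level (q : List (Int × Int)) (k prev : Int)
    (hs : q.Pairwise (fun a b => pairLt b a = false))
    (h : ∀ p ∈ q, ¬(eS q p.1 - (q.length : Int) * prev < k)) :
    loopB q (q.length : Int) k prev = (k, q) := by
  cases q with
  | nil => simp [loopB]
  | cons p ps =>
    rw [loopB]
    by_cases hk : k = 0
    · simp [hk]
    · rw [if_neg hk]
      have hhead : ∀ x ∈ p :: ps, p.1 ≤ x.1 := by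
        intro x hx
        rcases List.mem_cons.mp hx with rfl | hx
        · exact le_refl _
        · have := (List.pairwise_cons.mp hs).1 x hx
          rw [not_pairLt_iff] at this
          rcases this with h1 | h1
          · exact le_of_lt h1
          · exact le_of_eq h1.1
      have hc := eS_const (p :: ps) p.1 hhead
      have hnp := h p (by simp)
      rw [hc] at hnp
      have hbr : k - ((p :: ps).length : Int) * (p.1 - prev) ≤ 0 := by
        rw [mul_sub]; linarith [not_lt.mp hnp]
      rw [if_pos hbr]

-- T is the largest food level strictly below k: the loop eats exactly the foods ≤ T
theorem loopB_level (q : List (Int × Int)) (k prev T : Int)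
    (hs : q.Pairwise (fun a b => pairLt b a = false))
    (hk0 : k = 0 → ∀ p ∈ q, prev ≤ p.1)
    (hT : T ∈ q.map Prod.fst)
    (hTk : eS q T - (q.length : Int) * prev < k)
    (hmax : ∀ t ∈ q.map Prod.fst, eS q t - (q.length : Int) * prev < k → t ≤ T) :
    loopB q (q.length : Int) k prev =
      (k - (eS q T - (q.length : Int) * prev), q.filter (fun p => decide (T < p.1))) := by
  induction q generalizing k prev with
  | nil => simp at hT
  | cons p ps ih =>
    obtain ⟨hhd, hps⟩ := List.pairwise_cons.mp hs
    have hhead : ∀ x ∈ p :: ps, p.1 ≤ x.1 := by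
      intro x hx
      rcases List.mem_cons.mp hx with rfl | hx
      · exact le_refl _
      · have := hhd x hx
        rw [not_pairLt_iff] at this
        rcases this with h1 | h1
        · exact le_of_lt h1
        · exact le_of_eq h1.1
    have hpshead : ∀ x ∈ ps, p.1 ≤ x.1 := fun x hx => hhead x (by simp [hx])
    have hTq : p.1 ≤ T := by
      rcases List.mem_map.mp hT with ⟨x, hx, rfl⟩
      exact hhead x hx
    rw [loopB]
    by_cases hk : k = 0
    · exfalso
      have hall := hk0 hk
      have hprevT : prev ≤ T := by
        rcases List.mem_map.mp hT with ⟨x, hx, rfl⟩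
        exact hall x hx
      have hlow : ((p :: ps).length : Int) * prev ≤ eS (p :: ps) T := by
        apply eS_lower
        intro x hx
        have := hall x hx
        omega
      rw [hk] at hTk
      omega
    · rw [if_neg hk]
      have hbreak : ¬(k - ((p :: ps).length : Int) * (p.1 - prev) ≤ 0) := by
        have h1 := eS_const (p :: ps) p.1 hhead
        have h2 := eS_mono (p :: ps) p.1 T hTq
        rw [mul_sub]
        intro hcon
        rw [h1] at h2
        linarith
      rw [if_neg hbreak]
      have hlen1 : ((p :: ps).length : Int) - 1 = (ps.length : Int) := by
        simp
      by_cases hrest : ∃ t ∈ ps.map Prod.fst,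
          eS ps t - (ps.length : Int) * p.1 < k - ((p :: ps).length : Int) * (p.1 - prev)
      · -- the maximal level T lies in the tail
        have hTps : T ∈ ps.map Prod.fst := by
          obtain ⟨t0, ht0m, ht0⟩ := hrest
          have ht0p : p.1 ≤ t0 := by
            rcases List.mem_map.mp ht0m with ⟨x, hx, rfl⟩
            exact hpshead x hx
          have ht0q : eS (p :: ps) t0 - ((p :: ps).length : Int) * prev < k := by
            rw [eS_cons_decomp p ps t0 prev ht0p]
            omega
          have ht0mem : t0 ∈ (p :: ps).map Prod.fst := by
            simp only [List.map_cons, List.mem_cons]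
            right; exact ht0m
          have ht0T : t0 ≤ T := hmax t0 ht0mem ht0q
          rcases List.mem_cons.mp (show T ∈ p.1 :: ps.map Prod.fst by simpa using hT)
            with h1 | h1
          · have : t0 = T := by omega
            rwa [← this]
          · exact h1
        have hTk' : eS ps T - (ps.length : Int) * p.1 <
            k - ((p :: ps).length : Int) * (p.1 - prev) := by
          have := hTk
          rw [eS_cons_decomp p ps T prev hTq] at this
          omega
        have hmax' : ∀ t ∈ ps.map Prod.fst,
            eS ps t - (ps.length : Int) * p.1 < k - ((p :: ps).length : Int) * (p.1 - prev) →
            t ≤ T := by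
          intro t htm htl
          have htp : p.1 ≤ t := by
            rcases List.mem_map.mp htm with ⟨x, hx, rfl⟩
            exact hpshead x hx
          have htmem : t ∈ (p :: ps).map Prod.fst := by
            simp only [List.map_cons, List.mem_cons]
            right; exact htm
          apply hmax t htmem
          rw [eS_cons_decomp p ps t prev htp]
          omega
        have hk0' : k - ((p :: ps).length : Int) * (p.1 - prev) = 0 →
            ∀ x ∈ ps, p.1 ≤ x.1 := by
          intro h0
          exact absurd (le_of_eq h0) hbreak |> False.elim
        rw [hlen1]
        rw [ih (k - ((p :: ps).length : Int) * (p.1 - prev)) p.1 hps hk0' hTps hTk' hmax']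
        rw [List.filter_cons_of_neg (by simp; omega)]
        have harith : k - ((p :: ps).length : Int) * (p.1 - prev) -
            (eS ps T - (ps.length : Int) * p.1) =
            k - (eS (p :: ps) T - ((p :: ps).length : Int) * prev) := by
          rw [eS_cons_decomp p ps T prev hTq]
          ring
        rw [harith]
      · -- T is the head value; the tail has no level
        push Not at hrest
        have hTeq : T = p.1 := by
          rcases List.mem_cons.mp (show T ∈ p.1 :: ps.map Prod.fst by simpa using hT)
            with h1 | h1
          · exact h1
          · exfalso
            have hTm : T ∈ ps.map Prod.fst := h1
            have hge := hrest T hTm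
            rw [eS_cons_decomp p ps T prev hTq] at hTk
            linarith
        have hnl : ∀ x ∈ ps, ¬(eS ps x.1 - (ps.length : Int) * p.1 <
            k - ((p :: ps).length : Int) * (p.1 - prev)) := by
          intro x hx
          exact not_lt.mpr (hrest x.1 (List.mem_map.mpr ⟨x, hx, rfl⟩))
        rw [hlen1]
        rw [loopB_no_level ps (k - ((p :: ps).length : Int) * (p.1 - prev)) p.1 hps hnl]
        have hkpos : 0 < k - ((p :: ps).length : Int) * (p.1 - prev) := not_le.mp hbreak
        have hstrict : ∀ x ∈ ps, T < x.1 := by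
          intro x hx
          rcases lt_or_eq_of_le (hpshead x hx) with h1 | h1
          · omega
          · exfalso
            have hxm : x.1 ∈ ps.map Prod.fst := List.mem_map.mpr ⟨x, hx, rfl⟩
            have hge := hrest x.1 hxm
            have hcst : eS ps x.1 = (ps.length : Int) * x.1 := by
              apply eS_const
              intro y hy
              have := hpshead y hy
              omega
            rw [hcst, ← h1] at hge
            linarith
        have hfil : List.filter (fun x => decide (T < x.1)) (p :: ps) = ps := by
          rw [List.filter_cons_of_neg (by simp; omega)]
          exact List.filter_eq_self.mpr (fun x hx => by simp; exact hstrict x hx)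
        have hfst : k - ((p :: ps).length : Int) * (p.1 - prev) =
            k - (eS (p :: ps) T - ((p :: ps).length : Int) * prev) := by
          rw [hTeq, eS_const (p :: ps) p.1 hhead, mul_sub]
        rw [hfst, hfil]

-- ---- the binary search of B ----

theorem eatenB_mono (ft : List Int) (t u : Int) (h : t ≤ u) : eatenB ft t ≤ eatenB ft u := by
  induction ft with
  | nil => simp [eatenB]
  | cons x xs ih =>
    simp only [eatenB, List.map_cons, List.sum_cons] at ih ⊢
    have : min x t ≤ min x u := by omega
    omega

theorem bsearchB_spec (ft : List Int) (k : Int) :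
    ∀ (lo hi : Int), lo < hi → eatenB ft lo < k → k ≤ eatenB ft hi →
      eatenB ft (bsearchB ft k lo hi) < k ∧ k ≤ eatenB ft (bsearchB ft k lo hi + 1) := by
  suffices h : ∀ (n : Nat) (lo hi : Int), (hi - lo).toNat ≤ n → lo < hi →
      eatenB ft lo < k → k ≤ eatenB ft hi →
      eatenB ft (bsearchB ft k lo hi) < k ∧ k ≤ eatenB ft (bsearchB ft k lo hi + 1) by
    intro lo hi h1 h2 h3
    exact h ((hi - lo).toNat) lo hi le_rfl h1 h2 h3
  intro n
  induction n with
  | zero => intro lo hi h0 hlt _ _; omega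
  | succ n ih =>
    intro lo hi hn hlt hlo hhi
    rw [bsearchB]
    by_cases hc : lo + 1 < hi
    · rw [if_pos hc]
      have hm : PySem.Int.floordiv (lo + hi) 2 = (lo + hi) / 2 :=
        PySem.Int.floordiv_eq_ediv_of_pos (by norm_num)
      rw [hm]
      have hb1 : lo < (lo + hi) / 2 := by omega
      have hb2 : (lo + hi) / 2 < hi := by omega
      by_cases he : eatenB ft ((lo + hi) / 2) < k
      · rw [if_pos he]
        exact ih ((lo + hi) / 2) hi (by omega) hb2 he hhi
      · rw [if_neg he]
        exact ih lo ((lo + hi) / 2) (by omega) hb1 hlo (by omega)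
    · rw [if_neg hc]
      have heq : hi = lo + 1 := by omega
      exact ⟨hlo, heq ▸ hhi⟩

theorem eatenB_low (ft : List Int) (t : Int) (h : ∀ x ∈ ft, t ≤ x) :
    eatenB ft t = (ft.length : Int) * t := by
  induction ft with
  | nil => simp [eatenB]
  | cons x xs ih =>
    have hx : t ≤ x := h x (by simp)
    have := ih (fun y hy => h y (by simp [hy]))
    simp only [eatenB, List.map_cons, List.sum_cons, List.length_cons] at this ⊢
    rw [min_eq_right hx, this]
    push_cast; ring

theorem eatenB_high (ft : List Int) (t : Int) (h : ∀ x ∈ ft, x ≤ t) :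
    eatenB ft t = ft.sum := by
  induction ft with
  | nil => simp [eatenB]
  | cons x xs ih =>
    have hx : x ≤ t := h x (by simp)
    have := ih (fun y hy => h y (by simp [hy]))
    simp only [eatenB, List.map_cons, List.sum_cons] at this ⊢
    rw [min_eq_left hx, this]

-- ---- bridges between the two sides ----

theorem eS_sortedPairs (ft : List Int) (t : Int) :
    eS (PySem.List.sorted2 (pairsB ft) (fun x => x.1) (fun x => x.2)) t = eatenB ft t := by
  have hperm : ((PySem.List.sorted2 (pairsB ft) (fun x => x.1) (fun x => x.2)).map
      (fun p => min p.1 t)).Perm ((pairsB ft).map (fun p => min p.1 t)) :=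
    (PySem.List.sorted2_perm (pairsB ft) _ _ false).map _
  unfold eS eatenB
  rw [hperm.sum_eq]
  unfold pairsB
  rw [List.map_map]
  conv_rhs => rw [← PySem.List.map_snd_enumerate ft 0, List.map_map]
  rfl

theorem fst_sortedPairs_perm (ft : List Int) :
    ((PySem.List.sorted2 (pairsB ft) (fun x => x.1) (fun x => x.2)).map Prod.fst).Perm ft := by
  have h1 : ((PySem.List.sorted2 (pairsB ft) (fun x => x.1) (fun x => x.2)).map Prod.fst).Perm
      ((pairsB ft).map Prod.fst) :=
    (PySem.List.sorted2_perm (pairsB ft) _ _ false).map _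
  have h2 : (pairsB ft).map Prod.fst = ft := by
    unfold pairsB
    rw [List.map_map]
    conv_rhs => rw [← PySem.List.map_snd_enumerate ft 0]
    rfl
  rw [h2] at h1
  exact h1

theorem pairsB_pairwise_snd (ft : List Int) :
    (pairsB ft).Pairwise (fun a b => a.2 < b.2) := by
  unfold pairsB
  refine List.Pairwise.map _ ?_ (PySem.List.pairwise_lt_enumerate ft 0)
  intro a b h
  simpa using by omega

theorem pyGet?_map_snd (L : List (Int × Int)) (i : Int) :
    ((PySem.List.pyGet? L i).getD (0, 0)).2 =
      (PySem.List.pyGet? (L.map Prod.snd) i).getD (0 : Int) := by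
  have key : ∀ (o : Option Nat),
      ((o.bind fun a => L[a]?).getD ((0 : Int), (0 : Int))).2 =
        (o.bind fun a => (L.map Prod.snd)[a]?).getD (0 : Int) := by
    intro o
    cases o with
    | none => simp
    | some a => cases hx : L[a]? <;> simp [List.getElem?_map, hx]
  simp only [PySem.List.pyGet?, PySem.List.pyIdx?, List.length_map]
  exact key _

theorem map_snd_pairsB (ft : List Int) :
    (pairsB ft).map Prod.snd = PySem.List.pyRange 1 ((ft.length : Int) + 1) 1 := by
  unfold pairsB
  rw [List.map_map]
  have : ((PySem.List.enumerate ft 0).map (fun p => p.1)).map (fun z => z + 1) =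
      PySem.List.pyRange 1 ((ft.length : Int) + 1) 1 := by
    rw [PySem.List.map_fst_enumerate, PySem.List.pyRange_one, PySem.List.pyRange_one,
      List.map_map]
    have he : ((ft.length : Int) + 1 - 1).toNat = (0 + (ft.length : Int) - 0).toNat := by omega
    rw [he]
    apply List.map_congr_left
    intro j hj
    simp [Function.comp]
    omega
  rw [← this, List.map_map]
  rfl

theorem mem_fst_sortedPairs (ft : List Int) (x : Int) :
    x ∈ (PySem.List.sorted2 (pairsB ft) (fun x => x.1) (fun x => x.2)).map Prod.fst ↔
      x ∈ ft :=
  (fst_sortedPairs_perm ft).mem_iff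

-- ===== VERDICT (by name: the statement is the Claim_ definition above) =====
theorem solution_spec : Claim_equal_solution := by
  intro ft k hdom hpre
  unfold Spec_solution solution solution_alt
  by_cases hg : ft.sum ≤ k
  · simp only [if_pos hg]
  · simp only [if_neg hg]
    obtain ⟨hpre1, hpre2⟩ := hpre
    simp only [Dom_solution, Bool.and_eq_true, List.all_eq_true, pvDomInt,
      decide_eq_true_eq] at hdom
    obtain ⟨hdft, hdk⟩ := hdom
    have hne : ft ≠ [] := by
      intro h0
      rcases hpre1 with h1 | h1
      · exact h1 h0
      · rw [h0] at hg; simp at hg; omega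
    have hn1 : 1 ≤ ft.length := List.length_pos_iff.mpr hne
    have hlow : eatenB ft (-(2 ^ 33)) < k := by
      have h1 : eatenB ft (-(2 ^ 33)) = (ft.length : Int) * (-(2 ^ 33)) :=
        eatenB_low ft _ (fun x hx => by have := hdft x hx; omega)
      have h2 : (1 : Int) ≤ (ft.length : Int) := by exact_mod_cast hn1
      rw [h1]
      nlinarith [hdk.1]
    have hhigh : k ≤ eatenB ft (2 ^ 33) := by
      have h1 : eatenB ft (2 ^ 33) = ft.sum :=
        eatenB_high ft _ (fun x hx => by have := hdft x hx; omega)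
      rw [h1]; omega
    obtain ⟨hbs1, hbs2⟩ := bsearchB_spec ft k (-(2 ^ 33)) (2 ^ 33) (by norm_num) hlow hhigh
    set lo := bsearchB ft k (-(2 ^ 33)) (2 ^ 33) with hlodef
    have hiff : ∀ x ∈ ft, (x ≤ lo ↔ eatenB ft x < k) := by
      intro x hx
      constructor
      · intro hxlo
        exact lt_of_le_of_lt (eatenB_mono ft x lo hxlo) hbs1
      · intro hxk
        by_contra hcon
        have h1 : lo + 1 ≤ x := by omega
        have := eatenB_mono ft (lo + 1) x h1
        omega
    rw [build_eq_sorted2]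
    rw [loop_eq _ _ _ _ (sortedPairs_pairwise ft) (sortedPairs_snd_nodup ft)]
    rw [sortedPairs_length ft, sub_sub_cancel]
    by_cases hbelow : ft.filter (fun x => decide (x ≤ lo)) = []
    · -- no food level strictly below k: nothing is removed
      have hnolevel : ∀ p ∈ PySem.List.sorted2 (pairsB ft) (fun x => x.1) (fun x => x.2),
          ¬(eS (PySem.List.sorted2 (pairsB ft) (fun x => x.1) (fun x => x.2)) p.1 -
            ((PySem.List.sorted2 (pairsB ft) (fun x => x.1) (fun x => x.2)).length : Int) * 0
            < k) := by
        intro p hp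
        have hp1 : p.1 ∈ ft := (mem_fst_sortedPairs ft p.1).mp (List.mem_map_of_mem hp)
        have hnl : ¬(p.1 ≤ lo) := by
          intro hle
          have : p.1 ∈ ft.filter (fun x => decide (x ≤ lo)) :=
            List.mem_filter.mpr ⟨hp1, by simpa using hle⟩
          rw [hbelow] at this
          simp at this
        rw [mul_zero, sub_zero, eS_sortedPairs]
        exact fun hk2 => hnl ((hiff p.1 hp1).mpr hk2)
      have hloop := loopB_no_level _ k 0 (sortedPairs_pairwise ft) hnolevel
      rw [sortedPairs_length] at hloop
      rw [hloop]
      dsimp only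
      have hsorted_eq : PySem.List.sorted
          (PySem.List.sorted2 (pairsB ft) (fun x => x.1) (fun x => x.2)) (fun x => x.2) =
          pairsB ft :=
        PySem.List.sorted_eq_of_perm_of_pairwise_lt _ _ _
          (PySem.List.sorted2_perm (pairsB ft) _ _ false).symm (pairsB_pairwise_snd ft)
      rw [hsorted_eq, pyGet?_map_snd, map_snd_pairsB]
      rw [sortedPairs_length]
      rw [if_neg (fun hcon => hcon hbelow)]
      have hlen : ((PySem.List.pyRange 1 ((ft.length : Int) + 1) 1).length : Int) =
          (ft.length : Int) := by
        rw [PySem.List.length_pyRange_one]; omega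
      rw [hlen]
    · -- the maximal fully eaten level is max(below)
      cases hmx : PySem.List.max? (ft.filter (fun x => decide (x ≤ lo))) (fun x => x) with
      | none => exact absurd ((PySem.List.max?_eq_none_iff _ _).mp hmx) hbelow
      | some m =>
        have hmmem := PySem.List.max?_mem hmx
        have hmmax := PySem.List.max?_isMax hmx
        obtain ⟨hmft, hmlo'⟩ := List.mem_filter.mp hmmem
        have hmlo : m ≤ lo := by simpa using hmlo'
        have hmk : eatenB ft m < k := (hiff m hmft).mp hmlo
        have hloop := loopB_level
          (PySem.List.sorted2 (pairsB ft) (fun x => x.1) (fun x => x.2)) k 0 m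
          (sortedPairs_pairwise ft)
          (by
            intro h0 p hp
            have hp1 : p.1 ∈ ft := (mem_fst_sortedPairs ft p.1).mp (List.mem_map_of_mem hp)
            by_contra hneg
            exact hpre2 ⟨h0, ⟨p.1, hp1, by omega⟩, by omega⟩)
          ((mem_fst_sortedPairs ft m).mpr hmft)
          (by rw [mul_zero, sub_zero, eS_sortedPairs]; exact hmk)
          (by
            intro t htm htk
            rw [mul_zero, sub_zero, eS_sortedPairs] at htk
            have htft : t ∈ ft := (mem_fst_sortedPairs ft t).mp htm
            have : t ∈ ft.filter (fun x => decide (x ≤ lo)) :=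
              List.mem_filter.mpr ⟨htft, by simpa using (hiff t htft).mpr htk⟩
            simpa using hmmax t this)
        rw [mul_zero, sub_zero, eS_sortedPairs] at hloop
        rw [sortedPairs_length] at hloop
        rw [hloop]
        dsimp only
        have hpermf : ((PySem.List.sorted2 (pairsB ft) (fun x => x.1) (fun x => x.2)).filter
            (fun p => decide (m < p.1))).Perm
            ((pairsB ft).filter (fun p => decide (m < p.1))) :=
          (PySem.List.sorted2_perm (pairsB ft) _ _ false).filter _
        have hsf : PySem.List.sorted
            ((PySem.List.sorted2 (pairsB ft) (fun x => x.1) (fun x => x.2)).filter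
              (fun p => decide (m < p.1))) (fun x => x.2) =
            (pairsB ft).filter (fun p => decide (m < p.1)) :=
          PySem.List.sorted_eq_of_perm_of_pairwise_lt _ _ _ hpermf.symm
            (List.Pairwise.sublist List.filter_sublist (pairsB_pairwise_snd ft))
        rw [hsf, pyGet?_map_snd]
        have hmap : ((pairsB ft).filter (fun p => decide (m < p.1))).map Prod.snd =
            ((PySem.List.enumerate ft).filter (fun p => decide (m < p.2))).map
              (fun p => p.1 + 1) := by
          unfold pairsB
          simp only [List.filter_map, List.map_map]
          rfl
        rw [hmap]
        rw [if_pos hbelow]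
        simp only [Option.getD_some]
        have hlenf : (((PySem.List.sorted2 (pairsB ft) (fun x => x.1) (fun x => x.2)).filter
            (fun p => decide (m < p.1))).length : Int) =
            ((((PySem.List.enumerate ft).filter (fun p => decide (m < p.2))).map
              (fun p => p.1 + 1)).length : Int) := by
          rw [hpermf.length_eq]
          unfold pairsB
          simp only [List.filter_map, List.length_map]
          rfl
        rw [hlenf]
        rfl
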